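-- pv_equiv track=rewrite | github.com/sushma8328/pythontest | strings.py | move_space
-- ===== SOURCE A (Python) =====
-- def move_space(s):
-- 	x = ''
-- 	for each in s:
-- 		if(each == ' '):
-- 			x = ' ' + x
-- 		else:
-- 			x = x  + each
-- 	return x
-- ===== SOURCE B (Python) =====
-- def move_space(s):
-- 	return ''.join(sorted(s, key=lambda c: c != ' '))
-- ===== Notes on version B (the rewrite author's own statement) =====
-- stated objective: idiomatic
-- what changed: Replaced the explicit loop that prepends spaces and appends non-spaces with a single stable sort keyed on the boolean non-space test, joined back to a string.
import Mathlib
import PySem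

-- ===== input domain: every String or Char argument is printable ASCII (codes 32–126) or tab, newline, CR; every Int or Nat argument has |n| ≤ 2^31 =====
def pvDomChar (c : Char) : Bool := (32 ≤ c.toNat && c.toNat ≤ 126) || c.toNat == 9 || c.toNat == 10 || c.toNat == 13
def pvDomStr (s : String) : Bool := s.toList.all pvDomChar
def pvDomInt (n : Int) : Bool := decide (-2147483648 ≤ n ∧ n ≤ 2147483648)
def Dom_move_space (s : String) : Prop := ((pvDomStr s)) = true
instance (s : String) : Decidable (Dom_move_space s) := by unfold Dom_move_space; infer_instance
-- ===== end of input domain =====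

-- B replaces A's prepend/append accumulation loop with one stable sort keyed on whether the character is a non-space (idiomatic).

-- ===== PORT A =====
-- A's loop: x = '' ; for each in s: if each == ' ': x = ' ' + x else: x = x + each
def move_space (s : String) : String :=
  String.mk (s.toList.foldl (fun x c => if c = ' ' then ' ' :: x else x ++ [c]) [])

-- ===== PORT B =====
-- B: ''.join(sorted(s, key=lambda c: c != ' '))  — PySem.List.sorted is Python's stable sort
def move_space_alt (s : String) : String :=
  String.mk (PySem.List.sorted s.toList (fun c => decide (c ≠ ' ')) false)

-- ===== PRECONDITION & SPEC =====
def Spec_move_space (s : String) (out : String) : Prop := out = move_space_alt s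
instance (s : String) (out : String) : Decidable (Spec_move_space s out) := by unfold Spec_move_space; infer_instance

-- ===== CLAIM (what is proved, stated in full; the proofs are below) =====
def Claim_equal_move_space : Prop := ∀ (s : String), Dom_move_space s → Spec_move_space s (move_space s)

-- ===== LEMMAS AND PROOFS =====

-- A's loop result: reversed spaces in front, non-spaces in order behind the accumulator.
theorem pvA_foldl_char (l acc : List Char) :
    l.foldl (fun x c => if c = ' ' then ' ' :: x else x ++ [c]) acc
      = (l.filter (fun c => c = ' ')).reverse ++ acc ++ l.filter (fun c => ¬ c = ' ') := by
  induction l generalizing acc with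
  | nil => simp
  | cons c l ih =>
    by_cases hc : c = ' ' <;> simp [hc, ih]

theorem pvInsertBy_append {α : Type} (before : α → α → Bool) (x : α) (F T : List α)
    (hF : ∀ y ∈ F, before x y = false) :
    PySem.List.insertBy before x (F ++ T) = F ++ PySem.List.insertBy before x T := by
  induction F with
  | nil => simp
  | cons a F ih =>
    have ha : before x a = false := hF a (by simp)
    simp [PySem.List.insertBy, ha, ih (fun y hy => hF y (by simp [hy]))]

-- B's stable sort on the Bool key "c ≠ ' '" = spaces (in order) then non-spaces (in order).
theorem pvB_sorted_char (l : List Char) :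
    PySem.List.sorted l (fun c => decide (c ≠ ' ')) false
      = l.filter (fun c => c = ' ') ++ l.filter (fun c => ¬ c = ' ') := by
  rw [PySem.List.sorted_eq_foldl_insertBy]
  suffices h : ∀ (l F T : List Char), (∀ y ∈ F, y = ' ') → (∀ y ∈ T, ¬ y = ' ') →
      l.foldl (fun acc x => PySem.List.insertBy
        (fun a b => decide ((decide (a ≠ ' ') : Bool) < (decide (b ≠ ' ') : Bool))) x acc) (F ++ T)
        = (F ++ l.filter (fun c => c = ' ')) ++ (T ++ l.filter (fun c => ¬ c = ' ')) by
    simpa using h l [] [] (by simp) (by simp)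
  intro l
  induction l with
  | nil => intro F T _ _; simp
  | cons c l ih =>
    intro F T hF hT
    by_cases hc : c = ' '
    · have hins : PySem.List.insertBy
          (fun a b => decide ((decide (a ≠ ' ') : Bool) < (decide (b ≠ ' ') : Bool))) c (F ++ T)
          = (F ++ [c]) ++ T := by
        rw [pvInsertBy_append]
        · cases T with
          | nil => simp [PySem.List.insertBy]
          | cons t ts =>
            have ht : ¬ t = ' ' := hT t (by simp)
            simp [PySem.List.insertBy, hc, ht]
        · intro y hy
          simp [hc, hF y hy]
      have hF' : ∀ y ∈ F ++ [c], y = ' ' := by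
        intro y hy
        rcases List.mem_append.1 hy with h | h
        · exact hF y h
        · rw [List.mem_singleton.1 h]; exact hc
      have hrec := ih (F ++ [c]) T hF' hT
      simp only [List.foldl_cons]
      rw [hins, hrec]
      simp [hc]
    · have hins : PySem.List.insertBy
          (fun a b => decide ((decide (a ≠ ' ') : Bool) < (decide (b ≠ ' ') : Bool))) c (F ++ T)
          = F ++ (T ++ [c]) := by
        have := PySem.List.insertBy_of_forall_not_before
          (fun a b => decide ((decide (a ≠ ' ') : Bool) < (decide (b ≠ ' ') : Bool))) c (F ++ T)
          (by intro y _; simp [hc])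
        rw [this, List.append_assoc]
      have hT' : ∀ y ∈ T ++ [c], ¬ y = ' ' := by
        intro y hy
        rcases List.mem_append.1 hy with h | h
        · exact hT y h
        · rw [List.mem_singleton.1 h]; exact hc
      have hrec := ih F (T ++ [c]) hF hT'
      simp only [List.foldl_cons]
      rw [hins, hrec]
      simp [hc]

-- The reversed space-block equals the space-block (all its elements are ' ').
theorem pvReverse_spaces (l : List Char) :
    (l.filter (fun c => c = ' ')).reverse = l.filter (fun c => c = ' ') := by
  have h : ∀ m : List Char, (∀ y ∈ m, y = ' ') → m.reverse = m := by
    intro m hm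
    have : m = List.replicate m.length ' ' := by
      apply List.eq_replicate_of_mem; intro b hb; exact hm b hb
    rw [this, List.reverse_replicate]
  exact h _ (by intro y hy; simpa using (List.mem_filter.1 hy).2)

-- ===== VERDICT (by name: the statement is the Claim_ definition above) =====
theorem move_space_spec : Claim_equal_move_space := by
  intro s _
  unfold Spec_move_space move_space move_space_alt
  rw [pvA_foldl_char, pvB_sorted_char, pvReverse_spaces]
  simp
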